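-- pv_equiv track=rewrite | github.com/Kennethluiggi/changelog-translator-api | app/translator.py | impact_from_risks
-- ===== SOURCE A (Python) =====
-- from typing import List
--
-- def impact_from_risks(risks: List[str]) -> str:
--     # High impact signals
--     high = {"breaking change", "downtime risk", "migration required"}
--     if any(r in high for r in risks):
--         return "high"
--
--     # Medium impact signals
--     medium = {"authentication impact", "billing impact", "rate limit impact"}
--     if any(r in medium for r in risks):
--         return "medium"
--
--     return "low"
-- ===== SOURCE B (Python) =====
-- from typing import List
--
-- _PRIORITY = {
--     "breaking change": 2,
--     "downtime risk": 2,
--     "migration required": 2,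
--     "authentication impact": 1,
--     "billing impact": 1,
--     "rate limit impact": 1,
-- }
--
-- _LABELS = ("low", "medium", "high")
--
-- def impact_from_risks(risks: List[str]) -> str:
--     level = 0
--     for r in risks:
--         level = max(level, _PRIORITY.get(r, 0))
--     return _LABELS[level]
-- ===== Notes on version B (the rewrite author's own statement) =====
-- stated objective: alternative
-- what changed: Replaces A's two separate any-scans over two sets with a single table-driven pass computing the maximum priority from one dict, then mapping the rank to its label.
import Mathlib
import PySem

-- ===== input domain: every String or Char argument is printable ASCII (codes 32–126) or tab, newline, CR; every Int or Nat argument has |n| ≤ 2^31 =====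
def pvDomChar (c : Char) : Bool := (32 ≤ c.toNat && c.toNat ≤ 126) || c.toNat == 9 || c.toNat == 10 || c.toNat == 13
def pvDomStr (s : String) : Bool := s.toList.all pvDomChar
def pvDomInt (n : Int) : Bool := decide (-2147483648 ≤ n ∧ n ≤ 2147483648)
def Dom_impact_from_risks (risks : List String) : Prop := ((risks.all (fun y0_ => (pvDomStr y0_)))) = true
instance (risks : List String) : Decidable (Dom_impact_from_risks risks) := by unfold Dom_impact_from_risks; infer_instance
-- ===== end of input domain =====

-- ===== PORT A =====
-- B replaces A's two any-scans over two sets by one table-driven pass taking the max priority (objective: alternative).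
-- A's Python set literals are ported as lists of their distinct elements (PySem.Set convention).
def pvHigh : List String := ["breaking change", "downtime risk", "migration required"]
def pvMedium : List String := ["authentication impact", "billing impact", "rate limit impact"]

def impact_from_risks (risks : List String) : String :=
  if risks.any (fun r => pvHigh.contains r) then "high"
  else if risks.any (fun r => pvMedium.contains r) then "medium"
  else "low"

-- ===== PORT B =====
def pvPriority : PySem.Dict String Int :=
  PySem.Dict.mk [("breaking change", 2), ("downtime risk", 2), ("migration required", 2),
                 ("authentication impact", 1), ("billing impact", 1), ("rate limit impact", 1)]

def pvLabels : List String := ["low", "medium", "high"]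

def impact_from_risks_alt (risks : List String) : String :=
  let level := risks.foldl (fun m r => max m (pvPriority.getD r 0)) 0
  -- _LABELS[level]; level is always 0, 1 or 2, so the default is never used
  PySem.List.pyGetD pvLabels level "low"

-- ===== PRECONDITION & SPEC =====
def Spec_impact_from_risks (risks : List String) (out : String) : Prop := out = impact_from_risks_alt risks
instance (risks : List String) (out : String) : Decidable (Spec_impact_from_risks risks out) := by unfold Spec_impact_from_risks; infer_instance

-- ===== CLAIM (what is proved, stated in full; the proofs are below) =====
def Claim_equal_impact_from_risks : Prop := ∀ (risks : List String), Dom_impact_from_risks risks → Spec_impact_from_risks risks (impact_from_risks risks)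

-- ===== LEMMAS AND PROOFS =====

-- the per-element priority of B's table, characterised against A's two membership tests
set_option maxRecDepth 8192 in
lemma pvRank_char (r : String) :
    pvPriority.getD r 0 = (if pvHigh.contains r then 2 else if pvMedium.contains r then 1 else 0) := by
  simp only [pvPriority, pvHigh, pvMedium, PySem.Dict.getD_eq_get?_getD, PySem.Dict.get?_mk_cons,
    List.contains_cons, List.contains_nil, beq_iff_eq, Bool.or_eq_true, Bool.or_false]
  by_cases h1 : r = "breaking change" <;> by_cases h2 : r = "downtime risk" <;>
    by_cases h3 : r = "migration required" <;> by_cases h4 : r = "authentication impact" <;>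
    by_cases h5 : r = "billing impact" <;> by_cases h6 : r = "rate limit impact" <;>
    simp [h1, h2, h3, h4, h5, h6, eq_comm, PySem.Dict.get?]

-- B's fold computes the maximal rank, for any nonnegative accumulator
lemma pvFold_char (risks : List String) : ∀ (m : Int), 0 ≤ m →
    risks.foldl (fun m r => max m (pvPriority.getD r 0)) m =
      max m (if risks.any (fun r => pvHigh.contains r) then 2
             else if risks.any (fun r => pvMedium.contains r) then 1 else 0) := by
  induction risks with
  | nil => intro m hm; simp only [List.foldl_nil, List.any_nil, Bool.false_eq_true, if_false]; omega
  | cons r rs ih =>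
    intro m hm
    simp only [List.foldl_cons, List.any_cons]
    rw [ih _ (le_trans hm (le_max_left _ _)), pvRank_char r]
    rcases Bool.eq_false_or_eq_true (pvHigh.contains r) with h1|h1 <;>
      rcases Bool.eq_false_or_eq_true (pvMedium.contains r) with h2|h2 <;>
      rcases Bool.eq_false_or_eq_true (rs.any (fun r => pvHigh.contains r)) with h3|h3 <;>
      rcases Bool.eq_false_or_eq_true (rs.any (fun r => pvMedium.contains r)) with h4|h4 <;>
      simp only [h1, h2, h3, h4, Bool.or_true, Bool.or_false,
        Bool.false_eq_true, if_true, if_false] <;> omega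

-- ===== VERDICT (by name: the statement is the Claim_ definition above) =====
theorem impact_from_risks_spec : Claim_equal_impact_from_risks := by
  intro risks _
  unfold Spec_impact_from_risks impact_from_risks impact_from_risks_alt
  show _ = PySem.List.pyGetD pvLabels (risks.foldl (fun m r => max m (pvPriority.getD r 0)) 0) "low"
  rw [pvFold_char risks 0 le_rfl]
  rcases Bool.eq_false_or_eq_true (risks.any (fun r => pvHigh.contains r)) with h1|h1 <;>
    rcases Bool.eq_false_or_eq_true (risks.any (fun r => pvMedium.contains r)) with h2|h2 <;>
    simp only [h1, h2, Bool.false_eq_true, if_true, if_false] <;> decide
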